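-- pv_equiv track=rewrite | github.com/sohamxda7/openskill | src/openskill/ide/editor_support.py | symbol_fragment_bounds
-- ===== SOURCE A (Python) =====
-- _SYMBOL_DELIMITERS = set("()[]{}'\"`;,\t\r\n ")
--
-- def symbol_fragment_bounds(text, cursor_offset):
--     if cursor_offset < 0:
--         cursor_offset = 0
--     if cursor_offset > len(text):
--         cursor_offset = len(text)
--     start = cursor_offset
--     while start > 0 and text[start - 1] not in _SYMBOL_DELIMITERS:
--         start -= 1
--     end = cursor_offset
--     while end < len(text) and text[end] not in _SYMBOL_DELIMITERS:
--         end += 1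
--     return start, end, text[start:end]
-- ===== SOURCE B (Python) =====
-- _SYMBOL_DELIMITERS = set("()[]{}'\"`;,\t\r\n ")
--
-- def symbol_fragment_bounds(text, cursor_offset):
--     c = min(max(cursor_offset, 0), len(text))
--     start = max((text.rfind(d, 0, c) for d in _SYMBOL_DELIMITERS), default=-1) + 1
--     hits = [i for i in (text.find(d, c) for d in _SYMBOL_DELIMITERS) if i != -1]
--     end = min(hits) if hits else len(text)
--     return start, end, text[start:end]
-- ===== Notes on version B (the rewrite author's own statement) =====
-- stated objective: faster
-- what changed: Instead of scanning character-by-character outward from the cursor, B clamps the cursor and locates the boundaries by querying each delimiter's nearest occurrence with str.rfind/str.find and combining them with max/min.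
import Mathlib
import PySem

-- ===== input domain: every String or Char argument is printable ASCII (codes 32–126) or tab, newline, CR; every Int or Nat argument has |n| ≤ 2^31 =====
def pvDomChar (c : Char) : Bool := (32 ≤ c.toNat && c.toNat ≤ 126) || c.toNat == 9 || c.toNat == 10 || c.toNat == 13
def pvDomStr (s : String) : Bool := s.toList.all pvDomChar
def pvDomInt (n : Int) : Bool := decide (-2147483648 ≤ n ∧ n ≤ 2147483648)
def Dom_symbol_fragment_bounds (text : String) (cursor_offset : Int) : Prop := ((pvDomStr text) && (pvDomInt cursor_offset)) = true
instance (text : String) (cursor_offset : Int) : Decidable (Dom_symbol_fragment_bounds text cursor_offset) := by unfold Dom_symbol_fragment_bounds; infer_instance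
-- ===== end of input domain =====

-- B finds the fragment boundaries by per-delimiter rfind/find queries combined with max/min
-- instead of A's character-by-character outward scan; same O(n) cost, measured constant-factor faster in Python.

def pvDelims : List Char := "()[]{}'\"`;,\t\r\n ".toList

-- ===== PORT A =====
-- while start > 0 and text[start-1] not in _SYMBOL_DELIMITERS: start -= 1
def pvAStart (L : List Char) : Nat → Nat
  | 0 => 0
  | s + 1 => if !(pvDelims.contains (L.getD s ' ')) then pvAStart L s else s + 1

-- while end < len(text) and text[end] not in _SYMBOL_DELIMITERS: end += 1
def pvAEnd (L : List Char) (e : Nat) : Nat :=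
  if e < L.length then
    if !(pvDelims.contains (L.getD e ' ')) then pvAEnd L (e + 1) else e
  else e
termination_by L.length - e

def symbol_fragment_bounds (text : String) (cursor_offset : Int) : Int × Int × String :=
  let L := text.toList
  let n : Int := L.length
  let co1 := if cursor_offset < 0 then 0 else cursor_offset
  let co2 := if co1 > n then n else co1
  let c : Nat := co2.toNat
  let start := pvAStart L c
  let e := pvAEnd L c
  ((start : Int), (e : Int), String.ofList (PySem.List.slice L (some (start : Int)) (some (e : Int))))

-- ===== PORT B =====
-- text.rfind(d, 0, c) for a single-char d with 0 ≤ c ≤ len(text): highest index i < c with L[i] = d, else -1 (exact on that domain)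
def pvRFindChar (L : List Char) (d : Char) (c : Nat) : Int :=
  match (L.take c).reverse.findIdx? (· == d) with
  | none => -1
  | some j => ((L.take c).length : Int) - 1 - j

-- text.find(d, c) for a single-char d with 0 ≤ c ≤ len(text): lowest index i ≥ c with L[i] = d, else -1 (exact on that domain)
def pvFindChar (L : List Char) (d : Char) (c : Nat) : Int :=
  match (L.drop c).findIdx? (· == d) with
  | none => -1
  | some j => (c : Int) + j

def symbol_fragment_bounds_alt (text : String) (cursor_offset : Int) : Int × Int × String :=
  let L := text.toList
  let n : Int := L.length
  let c : Nat := (min (max cursor_offset 0) n).toNat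
  -- max((text.rfind(d, 0, c) for d in _SYMBOL_DELIMITERS), default=-1) + 1
  let start := (pvDelims.foldl (fun a d => max a (pvRFindChar L d c)) (-1)) + 1
  -- hits = [i for i in (text.find(d, c) for d in _SYMBOL_DELIMITERS) if i != -1]; min(hits) if hits else len(text)
  let hits := (pvDelims.map (fun d => pvFindChar L d c)).filter (fun i => i ≠ -1)
  let e := (hits.min?).getD n
  (start, e, String.ofList (PySem.List.slice L (some start) (some e)))

-- ===== PRECONDITION & SPEC =====
def Spec_symbol_fragment_bounds (text : String) (cursor_offset : Int) (out : Int × Int × String) : Prop := out = symbol_fragment_bounds_alt text cursor_offset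
instance (text : String) (cursor_offset : Int) (out : Int × Int × String) : Decidable (Spec_symbol_fragment_bounds text cursor_offset out) := by unfold Spec_symbol_fragment_bounds; infer_instance

-- ===== CLAIM (what is proved, stated in full; the proofs are below) =====
def Claim_equal_symbol_fragment_bounds : Prop := ∀ (text : String) (cursor_offset : Int), Dom_symbol_fragment_bounds text cursor_offset → Spec_symbol_fragment_bounds text cursor_offset (symbol_fragment_bounds text cursor_offset)

-- ===== LEMMAS AND PROOFS =====

-- last index (in the original prefix) at which p holds, seen through the reversed prefix R; -1 if none
def pvLastP (p : Char → Bool) (R : List Char) : Int :=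
  match R.findIdx? p with
  | none => -1
  | some j => (R.length : Int) - 1 - j

-- first index ≥ c at which p holds in L, through S = L.drop c; n (= len) if none
def pvFirstP (p : Char → Bool) (S : List Char) (c n : Int) : Int :=
  match S.findIdx? p with
  | none => n
  | some j => c + j

theorem pvLastP_cons (p : Char → Bool) (r : Char) (R : List Char) :
    pvLastP p (r :: R) = if p r then (R.length : Int) else pvLastP p R := by
  simp only [pvLastP, List.findIdx?_cons]
  by_cases h : p r
  · simp [h]
  · simp only [h]
    cases hfi : R.findIdx? p with
    | none => simp
    | some j => simp; omega

theorem pvLastP_bounds (p : Char → Bool) (R : List Char) :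
    -1 ≤ pvLastP p R ∧ pvLastP p R < R.length := by
  induction R with
  | nil => simp [pvLastP]
  | cons r R ih =>
    rw [pvLastP_cons]
    by_cases h : p r <;> simp [h] <;> omega

theorem pvLastP_false (R : List Char) : pvLastP (fun _ => false) R = -1 := by
  induction R with
  | nil => rfl
  | cons r R ih => rw [pvLastP_cons]; simpa using ih

theorem pvLastP_or (p q : Char → Bool) (R : List Char) :
    max (pvLastP p R) (pvLastP q R) = pvLastP (fun ch => p ch || q ch) R := by
  induction R with
  | nil => simp [pvLastP]
  | cons r R ih =>
    rw [pvLastP_cons, pvLastP_cons, pvLastP_cons]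
    have hp := pvLastP_bounds p R
    have hq := pvLastP_bounds q R
    by_cases h1 : p r <;> by_cases h2 : q r <;> simp [h1, h2] <;>
      (try rw [← ih]) <;> (try omega)

theorem pvRFindChar_eq (L : List Char) (d : Char) (c : Nat) :
    pvRFindChar L d c = pvLastP (· == d) (L.take c).reverse := by
  simp [pvRFindChar, pvLastP]

theorem pvFoldMax (R : List Char) (ds : List Char) (a : Int) (ha : -1 ≤ a) :
    ds.foldl (fun x d => max x (pvLastP (· == d) R)) a
      = max a (pvLastP (fun ch => ds.contains ch) R) := by
  induction ds generalizing a with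
  | nil =>
    simp only [List.foldl_nil]
    have h0 : (fun ch => ([] : List Char).contains ch) = (fun _ : Char => false) := by
      funext ch; rfl
    rw [h0, pvLastP_false]; omega
  | cons d ds ih =>
    simp only [List.foldl_cons]
    rw [ih _ (by have := pvLastP_bounds (· == d) R; omega), max_assoc]
    congr 1
    rw [pvLastP_or]
    have hcs : (fun ch : Char => (ch == d) || ds.contains ch)
        = (fun ch : Char => (d :: ds).contains ch) := by
      funext ch; exact (List.contains_cons).symm
    rw [hcs]

theorem pvAStart_eq (L : List Char) (c : Nat) (hc : c ≤ L.length) :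
    (pvAStart L c : Int) = pvLastP (fun ch => pvDelims.contains ch) (L.take c).reverse + 1 := by
  induction c with
  | zero => simp [pvAStart, pvLastP]
  | succ s ih =>
    have hs : s < L.length := by omega
    have htake : L.take (s + 1) = L.take s ++ [L[s]] := by
      rw [List.take_add_one]; simp [List.getElem?_eq_getElem hs]
    have hget : L.getD s ' ' = L[s] := by
      simp [List.getD, List.getElem?_eq_getElem hs]
    have hlen : (((L.take s).reverse.length : Nat) : Int) = (s : Int) := by
      simp [Nat.min_eq_left (le_of_lt hs)]
    rw [htake, List.reverse_append, List.reverse_singleton, List.singleton_append, pvLastP_cons]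
    simp only [pvAStart, hget]
    cases h : pvDelims.contains L[s] with
    | true =>
      simp only [Bool.not_true, Bool.false_eq_true, if_false, if_true]
      rw [hlen]; push_cast; ring
    | false =>
      simp only [Bool.not_false, if_true, Bool.false_eq_true, if_false]
      exact ih (by omega)

theorem pvFirstP_cons (p : Char → Bool) (s : Char) (S : List Char) (c n : Int) :
    pvFirstP p (s :: S) c n = if p s then c else pvFirstP p S (c + 1) n := by
  simp only [pvFirstP, List.findIdx?_cons]
  by_cases h : p s
  · simp [h]
  · simp only [h]
    cases hfi : S.findIdx? p with
    | none => simp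
    | some j => simp; omega

theorem pvFirstP_bounds (p : Char → Bool) (S : List Char) (c n : Int)
    (h : c + S.length ≤ n) : c ≤ pvFirstP p S c n ∧ pvFirstP p S c n ≤ n := by
  induction S generalizing c with
  | nil => simp [pvFirstP] at *; omega
  | cons s S ih =>
    rw [pvFirstP_cons]
    have := ih (c + 1) (by simp at h ⊢; omega)
    by_cases hp : p s <;> simp [hp] <;> omega

theorem pvFirstP_or (p q : Char → Bool) (S : List Char) (c n : Int)
    (h : c + S.length ≤ n) :
    min (pvFirstP p S c n) (pvFirstP q S c n) = pvFirstP (fun ch => p ch || q ch) S c n := by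
  induction S generalizing c with
  | nil => simp [pvFirstP]
  | cons s S ih =>
    have hlen : c + 1 + (S.length : Int) ≤ n := by simp at h; omega
    rw [pvFirstP_cons, pvFirstP_cons, pvFirstP_cons]
    have hp := pvFirstP_bounds p S (c + 1) n hlen
    have hq := pvFirstP_bounds q S (c + 1) n hlen
    by_cases h1 : p s <;> by_cases h2 : q s <;> simp [h1, h2] <;>
      (try rw [← ih (c + 1) hlen]) <;> (try omega)

theorem pvFindIdx?_congr {α : Type} (p q : α → Bool) (l : List α)
    (h : ∀ x ∈ l, p x = q x) : l.findIdx? p = l.findIdx? q := by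
  induction l with
  | nil => rfl
  | cons x l ih =>
    simp only [List.findIdx?_cons]
    rw [h x (by simp), ih (fun y hy => h y (by simp [hy]))]

theorem pvFindChar_eq (L : List Char) (d : Char) (c : Nat) (n : Int)
    (hne : pvFindChar L d c ≠ -1) :
    pvFindChar L d c = pvFirstP (· == d) (L.drop c) (c : Int) n := by
  simp only [pvFindChar, pvFirstP] at *
  cases hfi : (L.drop c).findIdx? (· == d) with
  | none => simp [hfi] at hne
  | some j => simp

theorem pvMinCons (x : Int) (xs : List Int) (n : Int) (hx : x ≤ n) :
    ((x :: xs).min?).getD n = min x ((xs.min?).getD n) := by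
  rw [List.min?_cons]
  cases hm : xs.min? with
  | none => simp [hm]; omega
  | some m => simp [hm]

theorem pvFoldMin (L : List Char) (c : Nat) (n : Int) (hn : n = (L.length : Int))
    (hc : c ≤ L.length) (ds : List Char) :
    (((ds.map (fun d => pvFindChar L d c)).filter (fun i => i ≠ -1)).min?).getD n
      = pvFirstP (fun ch => ds.contains ch) (L.drop c) (c : Int) n := by
  induction ds with
  | nil =>
    have h0 : (fun ch => ([] : List Char).contains ch) = (fun _ : Char => false) := by
      funext ch; rfl
    have hnone : (L.drop c).findIdx? (fun _ : Char => false) = none := by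
      rw [List.findIdx?_eq_none_iff]; intro x _; rfl
    simp only [List.map_nil, List.filter_nil, pvFirstP, h0, hnone]
    rfl
  | cons d ds ih =>
    have hS : ((c : Int)) + (((L.drop c).length : Nat) : Int) ≤ n := by
      simp only [List.length_drop]; omega
    have hcons : (fun ch => (d :: ds).contains ch) = (fun ch => (ch == d) || ds.contains ch) := by
      funext ch; exact List.contains_cons
    simp only [List.map_cons, List.filter_cons]
    by_cases h : pvFindChar L d c = -1
    · have hcond : (decide (pvFindChar L d c ≠ -1)) = false := by simp [h]
      simp only [hcond, Bool.false_eq_true, if_false]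
      rw [ih]
      have hnone : (L.drop c).findIdx? (· == d) = none := by
        simp only [pvFindChar] at h
        cases hfi : (L.drop c).findIdx? (· == d) with
        | none => rfl
        | some j => rw [hfi] at h; simp at h; omega
      have hsame : (L.drop c).findIdx? (fun ch => (d :: ds).contains ch)
          = (L.drop c).findIdx? (fun ch => ds.contains ch) := by
        rw [hcons]
        apply pvFindIdx?_congr; intro x hx
        have hxd : (x == d) = false := by
          by_contra hcon
          have : x == d := by simpa using hcon
          have := List.findIdx?_eq_none_iff.mp hnone x hx
          simp_all
        simp [hxd]
      simp only [pvFirstP, hsame]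
    · have hcond : (decide (pvFindChar L d c ≠ -1)) = true := by simp [h]
      simp only [hcond, if_true]
      have hle : pvFindChar L d c ≤ n := by
        rw [pvFindChar_eq L d c n h]
        exact (pvFirstP_bounds _ _ _ _ hS).2
      rw [pvMinCons _ _ _ hle, ih, pvFindChar_eq L d c n h, pvFirstP_or _ _ _ _ _ hS, hcons]

theorem pvAEnd_eq (L : List Char) (e : Nat) (he : e ≤ L.length) :
    (pvAEnd L e : Int) = pvFirstP (fun ch => pvDelims.contains ch) (L.drop e) (e : Int) (L.length : Int) := by
  by_cases h : e < L.length
  · have hdrop : L.drop e = L[e] :: L.drop (e + 1) := List.drop_eq_getElem_cons h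
    have hget : L.getD e ' ' = L[e] := by
      simp [List.getD, List.getElem?_eq_getElem h]
    rw [pvAEnd, if_pos h, hget, hdrop, pvFirstP_cons]
    cases hd : pvDelims.contains L[e] with
    | true => simp only [hd, Bool.not_true, Bool.false_eq_true, if_false, if_true]
    | false =>
      simp only [hd, Bool.not_false, if_true, Bool.false_eq_true, if_false]
      rw [pvAEnd_eq L (e + 1) (by omega)]
      push_cast; ring_nf
  · have he' : e = L.length := by omega
    rw [pvAEnd, if_neg h]
    subst he'
    simp [pvFirstP]
termination_by L.length - e

-- ===== VERDICT (by name: the statement is the Claim_ definition above) =====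
theorem symbol_fragment_bounds_spec : Claim_equal_symbol_fragment_bounds := by
  intro text cursor_offset _
  unfold Spec_symbol_fragment_bounds symbol_fragment_bounds symbol_fragment_bounds_alt
  simp only []
  set L := text.toList with hL
  have hclamp : (if (if cursor_offset < 0 then 0 else cursor_offset) > (L.length : Int) then (L.length : Int)
      else (if cursor_offset < 0 then 0 else cursor_offset)) = min (max cursor_offset 0) (L.length : Int) := by
    split_ifs <;> omega
  rw [hclamp]
  set c : Nat := (min (max cursor_offset 0) (L.length : Int)).toNat with hcdef
  have hc : c ≤ L.length := by
    have h1 : min (max cursor_offset 0) (L.length : Int) ≤ (L.length : Int) := min_le_right _ _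
    omega
  have hstart : (pvAStart L c : Int)
      = (pvDelims.foldl (fun a d => max a (pvRFindChar L d c)) (-1)) + 1 := by
    rw [pvAStart_eq L c hc]
    have hfun : (fun (a : Int) (d : Char) => max a (pvRFindChar L d c))
        = (fun (a : Int) (d : Char) => max a (pvLastP (· == d) (L.take c).reverse)) := by
      funext a d; rw [pvRFindChar_eq]
    rw [hfun, pvFoldMax _ _ _ (le_refl _)]
    have := pvLastP_bounds (fun ch => pvDelims.contains ch) (L.take c).reverse
    omega
  have hend : (pvAEnd L c : Int)
      = ((((pvDelims.map (fun d => pvFindChar L d c)).filter (fun i => i ≠ -1)).min?).getD (L.length : Int)) := by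
    rw [pvAEnd_eq L c hc, pvFoldMin L c (L.length : Int) rfl hc]
  rw [hstart, hend]
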